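-- pv_equiv track=rewrite | github.com/TheMiggiestMig/aoc-2023 | day_13.py | search_for_split
-- ===== SOURCE A (Python) =====
-- def search_for_split(segment, smudges=0):
--     errors = 0
--     path_width = len(segment[0])
--     for mirror_x in range(1, path_width):
--         for distance in range(mirror_x):
--             if mirror_x + distance > path_width - 1:
--                     break
--
--             for line in segment:
--                 left = line[mirror_x - distance - 1]
--                 right = line[mirror_x + distance]
--
--                 if left != right:
--                     errors += 1
--
--                 if errors > smudges:
--                     break
--             else:
--                 continue
--             break
--
--         if errors == smudges:
--             return mirror_x
--         errors = 0
--     else: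
--         return 0
-- ===== SOURCE B (Python) =====
-- def search_for_split(segment, smudges=0):
--     # One pass over all unordered column pairs, bucketed by index-sum i+j:
--     # a split at x compares exactly the column pairs with i+j == 2*x - 1.
--     width = len(segment[0])
--     bucket = [0] * (2 * width)
--     for line in segment:
--         for i in range(width):
--             for j in range(i + 1, width):
--                 if line[i] != line[j]:
--                     bucket[i + j] += 1
--     for x in range(1, width):
--         if bucket[2 * x - 1] == smudges:
--             return x
--     return 0
-- ===== Notes on version B (the rewrite author's own statement) =====
-- stated objective: alternative
-- what changed: B replaces A's per-split mirrored column scan with early breaks by a single pass over all unordered column pairs that accumulates mismatch counts into buckets keyed by the index-sum i+j, then answers each split x by one table lookup bucket[2x-1].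
-- outside the precondition, e.g. on search_for_split(['bbbba', 'abbb'], 0): A returns 0, B raises IndexError
import Mathlib
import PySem

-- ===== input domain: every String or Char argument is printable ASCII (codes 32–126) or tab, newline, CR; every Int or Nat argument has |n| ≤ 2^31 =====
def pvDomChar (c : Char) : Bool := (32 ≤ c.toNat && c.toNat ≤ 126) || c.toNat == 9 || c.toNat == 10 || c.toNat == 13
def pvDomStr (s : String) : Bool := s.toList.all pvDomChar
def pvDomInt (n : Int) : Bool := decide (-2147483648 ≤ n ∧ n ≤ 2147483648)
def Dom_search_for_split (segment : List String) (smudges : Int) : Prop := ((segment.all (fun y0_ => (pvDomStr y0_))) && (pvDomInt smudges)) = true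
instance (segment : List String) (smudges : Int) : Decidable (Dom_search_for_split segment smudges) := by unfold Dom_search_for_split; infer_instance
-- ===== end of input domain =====

-- B replaces A's per-split mirrored scan with early breaks by one pass over all
-- unordered column pairs bucketed by index-sum, then one lookup per split
-- (alternative algorithm, same asymptotic cost).


-- ===== PORT A =====
-- inner `for line in segment:` loop; returns (errors, broke) where broke records the
-- `if errors > smudges: break`.  Pre_ guarantees both indices are in range for every
-- line (Python would raise IndexError otherwise), so getD never hits its default.
def pvLineLoop (rows : List (List Char)) (li ri : Nat) (errors smudges : Int) :
    Int × Bool :=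
  match rows with
  | [] => (errors, false)
  | line :: rest =>
    let left := line.getD li ' '
    let right := line.getD ri ' '
    let errors' := if left ≠ right then errors + 1 else errors
    if errors' > smudges then (errors', true)
    else pvLineLoop rest li ri errors' smudges

-- middle `for distance in range(mirror_x):` loop (n = remaining iterations);
-- first branch is the `if mirror_x + distance > path_width - 1: break`,
-- second break is the for/else propagation of the line-loop break.
def pvDistLoop (rows : List (List Char)) (mx pw : Nat) (smudges : Int) :
    Nat → Nat → Int → Int
  | 0, _, errors => errors
  | n + 1, d, errors =>
    if mx + d > pw - 1 then errors
    else
      let p := pvLineLoop rows (mx - d - 1) (mx + d) errors smudges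
      if p.2 then p.1 else pvDistLoop rows mx pw smudges n (d + 1) p.1

-- outer `for mirror_x in range(1, path_width):` loop; falls through to `return 0`.
def pvMxLoop (rows : List (List Char)) (pw : Nat) (smudges : Int) :
    Nat → Nat → Int
  | 0, _ => 0
  | n + 1, mx =>
    let errors := pvDistLoop rows mx pw smudges mx 0 0
    if errors = smudges then (mx : Int) else pvMxLoop rows pw smudges n (mx + 1)

def search_for_split (segment : List String) (smudges : Int) : Int :=
  let rows := segment.map String.toList
  let pw := (segment.headD "").toList.length  -- len(segment[0]); Pre_ gives segment ≠ []
  pvMxLoop rows pw smudges (pw - 1) 1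

-- ===== PORT B =====
-- bucket[i + j] += 1
def pvBump (b : List Int) (k : Nat) : List Int := b.set k (b.getD k 0 + 1)

-- for j in range(i + 1, width):  (n = remaining iterations, j = current index)
def pvJLoop (line : List Char) (i : Nat) : Nat → Nat → List Int → List Int
  | 0, _, b => b
  | n + 1, j, b =>
    pvJLoop line i n (j + 1)
      (if line.getD i ' ' ≠ line.getD j ' ' then pvBump b (i + j) else b)

-- for i in range(width):
def pvILoop (line : List Char) (w : Nat) : Nat → Nat → List Int → List Int
  | 0, _, b => b
  | n + 1, i, b => pvILoop line w n (i + 1) (pvJLoop line i (w - (i + 1)) (i + 1) b)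

-- for line in segment:
def pvRowsLoop (rows : List (List Char)) (w : Nat) (b : List Int) : List Int :=
  rows.foldl (fun b line => pvILoop line w w 0 b) b

-- for x in range(1, width): ... return 0
def pvXLoop (bucket : List Int) (smudges : Int) : Nat → Nat → Int
  | 0, _ => 0
  | n + 1, x =>
    if bucket.getD (2 * x - 1) 0 = smudges then (x : Int)
    else pvXLoop bucket smudges n (x + 1)

def search_for_split_alt (segment : List String) (smudges : Int) : Int :=
  let rows := segment.map String.toList
  let w := (segment.headD "").toList.length  -- len(segment[0])
  let bucket := pvRowsLoop rows w (List.replicate (2 * w) (0 : Int))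
  pvXLoop bucket smudges (w - 1) 1

-- ===== PRECONDITION & SPEC =====
-- Pre_ excludes the empty list and ragged grids (some row shorter than row 0):
-- there A raises IndexError, or returns a value that depends on its early-break
-- order while B indexes past a short row and raises; the function's natural
-- domain is a non-empty rectangular grid.
def Pre_search_for_split (segment : List String) (smudges : Int) : Prop :=
  segment ≠ [] ∧ ∀ t ∈ segment, (segment.headD "").toList.length ≤ t.toList.length
instance (segment : List String) (smudges : Int) : Decidable (Pre_search_for_split segment smudges) := by unfold Pre_search_for_split; infer_instance

def pvWitness_search_for_split : List String × Int := (["#.##.", ".####"], 1)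

def Spec_search_for_split (segment : List String) (smudges : Int) (out : Int) : Prop := out = search_for_split_alt segment smudges
instance (segment : List String) (smudges : Int) (out : Int) : Decidable (Spec_search_for_split segment smudges out) := by unfold Spec_search_for_split; infer_instance

-- ===== CLAIM (what is proved, stated in full; the proofs are below) =====
def Claim_equal_search_for_split : Prop := ∀ (segment : List String) (smudges : Int), Dom_search_for_split segment smudges → Pre_search_for_split segment smudges → Spec_search_for_split segment smudges (search_for_split segment smudges)

-- ===== LEMMAS AND PROOFS =====

-- mismatch count of one index pair over all rows (the common specification value)
def pvErrCnt : List (List Char) → Nat → Nat → Int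
  | [], _, _ => 0
  | line :: rest, l, r =>
    (if line.getD l ' ' ≠ line.getD r ' ' then 1 else 0) + pvErrCnt rest l r

-- sum of pvErrCnt over distances d, d+1, …, d+n-1 around split mx
def pvEsum (rows : List (List Char)) (mx : Nat) : Nat → Nat → Int
  | 0, _ => 0
  | n + 1, d => pvErrCnt rows (mx - 1 - d) (mx + d) + pvEsum rows mx n (d + 1)

theorem pvErrCnt_nonneg (rows : List (List Char)) (l r : Nat) : 0 ≤ pvErrCnt rows l r := by
  induction rows with
  | nil => simp [pvErrCnt]
  | cons a t ih => simp only [pvErrCnt]; split <;> omega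

theorem pvEsum_nonneg (rows : List (List Char)) (mx : Nat) :
    ∀ n d, 0 ≤ pvEsum rows mx n d := by
  intro n
  induction n with
  | zero => intro d; simp [pvEsum]
  | succ n ih =>
    intro d
    have := pvErrCnt_nonneg rows (mx - 1 - d) (mx + d)
    have := ih (d + 1)
    simp only [pvEsum]; omega

theorem pvLineLoop_main (rows : List (List Char)) (li ri : Nat) : ∀ e s : Int,
    e ≤ (pvLineLoop rows li ri e s).1 ∧
    (pvLineLoop rows li ri e s).1 ≤ e + pvErrCnt rows li ri ∧
    ((pvLineLoop rows li ri e s).2 = true → s < (pvLineLoop rows li ri e s).1) ∧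
    (e ≤ s → (pvLineLoop rows li ri e s).2 = false →
      (pvLineLoop rows li ri e s).1 = e + pvErrCnt rows li ri ∧
      (pvLineLoop rows li ri e s).1 ≤ s) := by
  induction rows with
  | nil => intro e s; simp [pvLineLoop, pvErrCnt]
  | cons a t ih =>
    intro e s
    have hnn := pvErrCnt_nonneg t li ri
    simp only [pvLineLoop, pvErrCnt]
    split_ifs
    all_goals first
    | (simp; omega)
    | (obtain ⟨g1, g2, g3, g4⟩ := ih (e + 1) s
       refine ⟨by omega, by omega, g3, fun hes hf => ?_⟩
       obtain ⟨h1, h2⟩ := g4 (by omega) hf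
       exact ⟨by omega, h2⟩)
    | (obtain ⟨g1, g2, g3, g4⟩ := ih e s
       refine ⟨by omega, by omega, g3, fun hes hf => ?_⟩
       obtain ⟨h1, h2⟩ := g4 (by omega) hf
       exact ⟨by omega, h2⟩)

-- invariant of the distance loop: either it computes the exact remaining mismatch
-- sum, or it broke early and both the result and the exact sum exceed smudges
theorem pvDistLoop_inv (rows : List (List Char)) (mx pw : Nat) (s : Int) :
    ∀ n d e, d + n = mx → 0 ≤ e → e ≤ s →
      pvDistLoop rows mx pw s n d e
          = e + pvEsum rows mx (min mx (pw - mx) - d) d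
      ∨ (s < pvDistLoop rows mx pw s n d e ∧
         s < e + pvEsum rows mx (min mx (pw - mx) - d) d) := by
  intro n
  induction n with
  | zero =>
    intro d e hd he hs
    have h0 : min mx (pw - mx) - d = 0 := by omega
    rw [h0]; left; simp [pvDistLoop, pvEsum]
  | succ n ih =>
    intro d e hd he hs
    simp only [pvDistLoop]
    split
    · rename_i hbr
      have h0 : min mx (pw - mx) - d = 0 := by omega
      rw [h0]; left; simp [pvEsum]
    · rename_i hbr
      have hspan : min mx (pw - mx) - d = (min mx (pw - mx) - (d + 1)) + 1 := by omega
      rw [hspan]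
      simp only [pvEsum]
      have hidx : mx - 1 - d = mx - d - 1 := by omega
      rw [hidx]
      obtain ⟨g1, g2, g3, g4⟩ := pvLineLoop_main rows (mx - d - 1) (mx + d) e s
      have hnn := pvErrCnt_nonneg rows (mx - d - 1) (mx + d)
      have hEnn := pvEsum_nonneg rows mx (min mx (pw - mx) - (d + 1)) (d + 1)
      split
      · rename_i hb
        have h1 := g3 hb
        right
        exact ⟨h1, by omega⟩
      · rename_i hb
        obtain ⟨hval, hle⟩ := g4 hs (by simpa using hb)
        rcases ih (d + 1) ((pvLineLoop rows (mx - d - 1) (mx + d) e s).1)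
            (by omega) (by omega) hle with h | ⟨ha, hb2⟩
        · left; rw [h, hval]; ring
        · right; exact ⟨ha, by omega⟩

-- per-split characterisation of A's inner computation
theorem pvDistLoop_eq_iff (rows : List (List Char)) (mx pw : Nat) (s : Int) :
    (pvDistLoop rows mx pw s mx 0 0 = s ↔
      pvEsum rows mx (min mx (pw - mx)) 0 = s) := by
  by_cases hs : 0 ≤ s
  · have h := pvDistLoop_inv rows mx pw s mx 0 0 (by omega) le_rfl hs
    simp only [Nat.sub_zero, zero_add] at h
    rcases h with h | ⟨h1, h2⟩
    · rw [h]
    · constructor <;> intro h <;> omega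
  · -- smudges < 0: the loop result is ≥ 0 and the sum is ≥ 0, both sides false
    have hres : ∀ n d e, 0 ≤ e → 0 ≤ pvDistLoop rows mx pw s n d e := by
      intro n
      induction n with
      | zero => intro d e he; simpa [pvDistLoop] using he
      | succ n ih =>
        intro d e he
        simp only [pvDistLoop]
        split
        · exact he
        · have hge := (pvLineLoop_main rows (mx - d - 1) (mx + d) e s).1
          split
          · omega
          · exact ih (d + 1) _ (by omega)
    have h1 := hres mx 0 0 le_rfl
    have h2 := pvEsum_nonneg rows mx (min mx (pw - mx)) 0
    constructor <;> intro h <;> omega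

-- ===== B-side: counting functions mirroring the loops =====

-- what the j-loop adds to bucket index k
def pvCntJ (line : List Char) (i k : Nat) : Nat → Nat → Int
  | 0, _ => 0
  | n + 1, j =>
    (if line.getD i ' ' ≠ line.getD j ' ' ∧ i + j = k then 1 else 0) +
      pvCntJ line i k n (j + 1)

-- what the i-loop adds to bucket index k
def pvCntI (line : List Char) (w k : Nat) : Nat → Nat → Int
  | 0, _ => 0
  | n + 1, i => pvCntJ line i k (w - (i + 1)) (i + 1) + pvCntI line w k n (i + 1)

-- per-row mismatch count at distances d, …, d+n-1 around split x
def pvEsumRow (line : List Char) (x : Nat) : Nat → Nat → Int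
  | 0, _ => 0
  | n + 1, d =>
    (if line.getD (x - 1 - d) ' ' ≠ line.getD (x + d) ' ' then 1 else 0) +
      pvEsumRow line x n (d + 1)

theorem pvBump_length (b : List Int) (k : Nat) : (pvBump b k).length = b.length := by
  simp [pvBump]

theorem pvBump_getD (b : List Int) (k k' : Nat) (hk : k < b.length) :
    (pvBump b k).getD k' 0 = b.getD k' 0 + (if k = k' then 1 else 0) := by
  by_cases h : k = k'
  · subst h
    simp [pvBump, List.getD_eq_getElem?_getD, hk]
  · simp [pvBump, List.getD_eq_getElem?_getD, List.getElem?_set_ne h, h]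

theorem pvJLoop_length (line : List Char) (i : Nat) :
    ∀ n j b, (pvJLoop line i n j b).length = b.length := by
  intro n
  induction n with
  | zero => intro j b; simp [pvJLoop]
  | succ n ih =>
    intro j b
    simp only [pvJLoop]
    rw [ih]
    split <;> simp [pvBump_length]

theorem pvJLoop_getD (line : List Char) (i k : Nat) :
    ∀ n j b, i + j + n ≤ b.length →
      (pvJLoop line i n j b).getD k 0 = b.getD k 0 + pvCntJ line i k n j := by
  intro n
  induction n with
  | zero => intro j b _; simp [pvJLoop, pvCntJ]
  | succ n ih =>
    intro j b hlen
    simp only [pvJLoop, pvCntJ]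
    by_cases hm : line.getD i ' ' ≠ line.getD j ' '
    · rw [if_pos hm]
      rw [ih (j + 1) (pvBump b (i + j)) (by rw [pvBump_length]; omega)]
      rw [pvBump_getD b (i + j) k (by omega)]
      by_cases he : i + j = k
      · rw [if_pos he, if_pos ⟨hm, he⟩]; ring
      · rw [if_neg he, if_neg (by tauto)]; ring
    · rw [if_neg hm, if_neg (by tauto)]
      rw [ih (j + 1) b (by omega)]
      ring

theorem pvILoop_length (line : List Char) (w : Nat) :
    ∀ n i b, (pvILoop line w n i b).length = b.length := by
  intro n
  induction n with
  | zero => intro i b; simp [pvILoop]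
  | succ n ih =>
    intro i b
    simp only [pvILoop]
    rw [ih, pvJLoop_length]

theorem pvILoop_getD (line : List Char) (w k : Nat) :
    ∀ n i b, b.length = 2 * w → i + n ≤ w →
      (pvILoop line w n i b).getD k 0 = b.getD k 0 + pvCntI line w k n i := by
  intro n
  induction n with
  | zero => intro i b _ _; simp [pvILoop, pvCntI]
  | succ n ih =>
    intro i b hb hi
    simp only [pvILoop, pvCntI]
    rw [ih (i + 1) (pvJLoop line i (w - (i + 1)) (i + 1) b)
      (by rw [pvJLoop_length]; exact hb) (by omega)]
    rw [pvJLoop_getD line i k (w - (i + 1)) (i + 1) b (by omega)]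
    ring

theorem pvRowsLoop_getD (w k : Nat) :
    ∀ (rows : List (List Char)) (b : List Int), b.length = 2 * w →
      (pvRowsLoop rows w b).getD k 0
        = b.getD k 0 + (rows.map (fun l => pvCntI l w k w 0)).sum := by
  intro rows
  induction rows with
  | nil => intro b _; simp [pvRowsLoop]
  | cons a t ih =>
    intro b hb
    simp only [pvRowsLoop, List.foldl_cons, List.map_cons, List.sum_cons]
    have := ih (pvILoop a w w 0 b) (by rw [pvILoop_length]; exact hb)
    simp only [pvRowsLoop] at this
    rw [this, pvILoop_getD a w k w 0 b hb (by omega)]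
    ring

-- ===== the combinatorial core: pvCntI at bucket 2x-1 = per-row mirror count =====

theorem pvCntJ_closed (line : List Char) (i k : Nat) :
    ∀ n j, pvCntJ line i k n j
      = if i ≤ k ∧ j ≤ k - i ∧ k - i < j + n ∧ line.getD i ' ' ≠ line.getD (k - i) ' '
        then 1 else 0 := by
  intro n
  induction n with
  | zero => intro j; simp only [pvCntJ]; rw [if_neg (by omega)]
  | succ n ih =>
    intro j
    simp only [pvCntJ, ih (j + 1)]
    by_cases he : i + j = k
    · have hki : k - i = j := by omega
      rw [hki]
      by_cases hm : line.getD i ' ' ≠ line.getD j ' '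
      · rw [if_pos ⟨hm, he⟩, if_neg (by omega), if_pos (by exact ⟨by omega, by omega, by omega, hm⟩)]
        norm_num
      · rw [if_neg (by tauto), if_neg (by omega), if_neg (by tauto)]
        norm_num
    · rw [if_neg (by tauto)]
      by_cases hc : i ≤ k ∧ j + 1 ≤ k - i ∧ k - i < j + 1 + n ∧ line.getD i ' ' ≠ line.getD (k - i) ' '
      · rw [if_pos hc, if_pos ⟨hc.1, by omega, by omega, hc.2.2.2⟩]; ring
      · rw [if_neg hc, if_neg (by
          intro ⟨h1, h2, h3, h4⟩
          exact hc ⟨h1, by omega, by omega, h4⟩)]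
        ring

-- the contribution of column index t to bucket k, for t < w
def pvF (line : List Char) (w k t : Nat) : Int :=
  if t ≤ k ∧ t + 1 ≤ k - t ∧ k - t < w ∧ line.getD t ' ' ≠ line.getD (k - t) ' '
  then 1 else 0

theorem pvCntI_sum (line : List Char) (w k : Nat) :
    ∀ n i, i + n ≤ w →
      pvCntI line w k n i = ∑ t ∈ Finset.range n, pvF line w k (i + t) := by
  intro n
  induction n with
  | zero => intro i _; simp [pvCntI]
  | succ n ih =>
    intro i hi
    simp only [pvCntI]
    rw [ih (i + 1) (by omega), Finset.sum_range_succ']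
    have hF : pvF line w k (i + 0) = pvCntJ line i k (w - (i + 1)) (i + 1) := by
      rw [pvCntJ_closed]
      simp only [pvF, Nat.add_zero]
      by_cases hc : i ≤ k ∧ i + 1 ≤ k - i ∧ k - i < w ∧
          line.getD i ' ' ≠ line.getD (k - i) ' '
      · rw [if_pos hc, if_pos ⟨hc.1, hc.2.1, by omega, hc.2.2.2⟩]
      · rw [if_neg hc, if_neg (by
          intro ⟨h1, h2, h3, h4⟩
          exact hc ⟨h1, h2, by omega, h4⟩)]
    have hrest : ∀ t, pvF line w k (i + (t + 1)) = pvF line w k (i + 1 + t) := by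
      intro t; congr 1; omega
    rw [Finset.sum_congr rfl (fun t _ => hrest t), hF]
    ring

theorem pvEsumRow_sum (line : List Char) (x : Nat) :
    ∀ n d, pvEsumRow line x n d
      = ∑ t ∈ Finset.range n,
          (if line.getD (x - 1 - (d + t)) ' ' ≠ line.getD (x + (d + t)) ' ' then 1 else 0 : Int) := by
  intro n
  induction n with
  | zero => intro d; simp [pvEsumRow]
  | succ n ih =>
    intro d
    simp only [pvEsumRow]
    rw [ih (d + 1), Finset.sum_range_succ']
    have hrest : ∀ t,
        (if line.getD (x - 1 - (d + 1 + t)) ' ' ≠ line.getD (x + (d + 1 + t)) ' ' then 1 else 0 : Int)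
          = (if line.getD (x - 1 - (d + (t + 1))) ' ' ≠ line.getD (x + (d + (t + 1))) ' ' then 1 else 0 : Int) := by
      intro t
      have h1 : d + 1 + t = d + (t + 1) := by omega
      rw [h1]
    rw [Finset.sum_congr rfl (fun t _ => hrest t)]
    simp only [Nat.add_zero]
    ring

-- the heart: summing bucket contributions over all columns = mirror count at x
theorem pvCntI_eq_pvEsumRow (line : List Char) (w x : Nat)
    (hx1 : 1 ≤ x) (hxw : x < w) :
    pvCntI line w (2 * x - 1) w 0 = pvEsumRow line x (min x (w - x)) 0 := by
  set k := 2 * x - 1 with hk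
  set span := min x (w - x) with hspan
  rw [pvCntI_sum line w k w 0 (by omega), pvEsumRow_sum]
  simp only [Nat.zero_add]
  -- restrict the left sum to Ico (x - span) x
  have hvanish : ∀ t ∈ Finset.range w, t ∉ Finset.Ico (x - span) x → pvF line w k t = 0 := by
    intro t ht hnot
    simp only [Finset.mem_range] at ht
    simp only [Finset.mem_Ico, not_and_or, not_le, not_lt] at hnot
    unfold pvF
    rcases hnot with h | h
    · -- t < x - span : then k - t ≥ w
      rw [if_neg (by intro ⟨h1, h2, h3, h4⟩; omega)]
    · -- x ≤ t : then t + 1 ≤ k - t fails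
      rw [if_neg (by intro ⟨h1, h2, h3, h4⟩; omega)]
  have hsub : Finset.Ico (x - span) x ⊆ Finset.range w := by
    intro t ht
    simp only [Finset.mem_Ico] at ht
    simp only [Finset.mem_range]
    omega
  rw [← Finset.sum_subset hsub hvanish]
  rw [Finset.sum_Ico_eq_sum_range]
  have hlen : x - (x - span) = span := by omega
  rw [hlen]
  conv_lhs => rw [← Finset.sum_range_reflect]
  apply Finset.sum_congr rfl
  intro t ht
  simp only [Finset.mem_range] at ht
  unfold pvF
  have h1 : x - span + (span - 1 - t) = x - 1 - t := by omega
  have h2 : k - (x - 1 - t) = x + t := by omega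
  rw [h1, h2]
  by_cases hm : line.getD (x - 1 - t) ' ' ≠ line.getD (x + t) ' '
  · rw [if_pos ⟨by omega, by omega, by omega, hm⟩, if_pos hm]
  · rw [if_neg (by tauto), if_neg hm]

-- sum splitting over rows
theorem pvSum_map_add (rows : List (List Char)) (f g : List Char → Int) :
    (rows.map (fun l => f l + g l)).sum = (rows.map f).sum + (rows.map g).sum := by
  induction rows with
  | nil => simp
  | cons a t ih => simp [ih]; ring

theorem pvErrCnt_as_sum (rows : List (List Char)) (l r : Nat) :
    pvErrCnt rows l r
      = (rows.map (fun line => if line.getD l ' ' ≠ line.getD r ' ' then (1 : Int) else 0)).sum := by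
  induction rows with
  | nil => simp [pvErrCnt]
  | cons a t ih => simp [pvErrCnt, ih]

theorem pvEsum_as_rowsum (rows : List (List Char)) (x : Nat) :
    ∀ n d, pvEsum rows x n d = (rows.map (fun l => pvEsumRow l x n d)).sum := by
  intro n
  induction n with
  | zero => intro d; simp [pvEsum, pvEsumRow]
  | succ n ih =>
    intro d
    simp only [pvEsum, pvEsumRow]
    rw [ih (d + 1), pvErrCnt_as_sum, ← pvSum_map_add]

-- final bucket value at 2x-1 = the specification sum
theorem pvBucket_eq (rows : List (List Char)) (w x : Nat) (hx1 : 1 ≤ x) (hxw : x < w) :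
    (pvRowsLoop rows w (List.replicate (2 * w) (0 : Int))).getD (2 * x - 1) 0
      = pvEsum rows x (min x (w - x)) 0 := by
  rw [pvRowsLoop_getD w (2 * x - 1) rows _ (by simp)]
  have h0 : (List.replicate (2 * w) (0 : Int)).getD (2 * x - 1) 0 = 0 := by
    rw [List.getD_eq_getElem?_getD, List.getElem?_replicate]
    split <;> simp
  rw [h0, zero_add, pvEsum_as_rowsum]
  have hfun : (fun l => pvCntI l w (2 * x - 1) w 0)
      = fun l => pvEsumRow l x (min x (w - x)) 0 :=
    funext (fun l => pvCntI_eq_pvEsumRow l w x hx1 hxw)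
  rw [hfun]

-- the two outer loops agree step by step
theorem pvLoops_eq (rows : List (List Char)) (w : Nat) (s : Int) :
    ∀ n x, 1 ≤ x → x + n = w →
      pvMxLoop rows w s n x
        = pvXLoop (pvRowsLoop rows w (List.replicate (2 * w) (0 : Int))) s n x := by
  intro n
  induction n with
  | zero => intro x _ _; simp [pvMxLoop, pvXLoop]
  | succ n ih =>
    intro x hx1 hxn
    have hxw : x < w := by omega
    have hA := pvDistLoop_eq_iff rows x w s
    have hB := pvBucket_eq rows w x hx1 hxw
    simp only [pvMxLoop, pvXLoop, hB]
    by_cases h : pvEsum rows x (min x (w - x)) 0 = s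
    · rw [if_pos (hA.mpr h), if_pos h]
    · rw [if_neg (fun hc => h (hA.mp hc)), if_neg h]
      exact ih (x + 1) (by omega) (by omega)

-- ===== VERDICT (by name: the statement is the Claim_ definition above) =====
theorem search_for_split_spec : Claim_equal_search_for_split := by
  intro segment smudges _ hpre
  unfold Spec_search_for_split search_for_split search_for_split_alt
  by_cases hw : (segment.headD "").toList.length = 0
  · simp only [hw, Nat.zero_sub, pvMxLoop, pvXLoop]
  · exact pvLoops_eq (segment.map String.toList) _ smudges _ 1 le_rfl (by omega)
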